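-- pv_equiv track=rewrite | github.com/rakib06/LearnPythonBasic | Thesis/DFLP_31_oct_code/DFLP_31_oct_code/helpers/clean.py | shiftCost
-- ===== SOURCE A (Python) =====
-- def shiftCost(myList,departments):
--
-- 	shiftCost = []
--
-- 	flowCost = []
-- 	flowCost2 =[]
-- 	dep = 1;
-- 	time =1;
-- 	for i in range(3,len(myList)):
-- 		if i >= len(myList) - departments :
-- 			shiftCost.append(myList[i])
-- 		else:
--
-- 			if (len(flowCost) >= 6):
-- 			#print (len(flowCost)   % departments )
-- 				flowCost2.append(flowCost)
-- 				flowCost =[]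
-- 				flowCost.append(myList[i])
-- 			else:
-- 				flowCost.append(myList[i])
-- 	return shiftCost
-- ===== SOURCE B (Python) =====
-- def shiftCost(myList, departments):
--     return list(myList[max(3, len(myList) - departments):])
-- ===== Notes on version B (the rewrite author's own statement) =====
-- stated objective: simpler
-- what changed: B replaces the explicit loop with its dead flowCost bookkeeping by a single slice starting at max(3, len(myList)-departments); the C-level slice also gives a constant-factor speedup.
import Mathlib
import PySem

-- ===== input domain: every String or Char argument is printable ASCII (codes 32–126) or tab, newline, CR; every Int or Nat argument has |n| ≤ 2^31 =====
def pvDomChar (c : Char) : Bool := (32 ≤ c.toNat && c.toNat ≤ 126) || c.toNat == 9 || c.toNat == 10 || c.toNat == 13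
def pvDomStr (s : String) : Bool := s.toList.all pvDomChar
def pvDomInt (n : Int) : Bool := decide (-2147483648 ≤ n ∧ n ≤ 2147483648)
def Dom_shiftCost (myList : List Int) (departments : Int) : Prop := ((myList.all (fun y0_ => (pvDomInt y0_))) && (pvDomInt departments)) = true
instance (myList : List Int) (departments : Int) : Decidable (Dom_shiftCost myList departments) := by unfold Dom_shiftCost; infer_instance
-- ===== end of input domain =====

-- B replaces A's loop (with its dead flowCost bookkeeping) by one slice from max(3, len-departments); objective: simpler.

-- ===== PORT A =====
-- loop state: (shiftCost, flowCost, flowCost2); indices from range(3, len) are always in range,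
-- so myList[i] is ported as pyGetD with default 0
def shiftCost (myList : List Int) (departments : Int) : List Int :=
  ((PySem.List.pyRange 3 (myList.length : Int) 1).foldl
    (fun (st : List Int × List Int × List (List Int)) i =>
      if (myList.length : Int) - departments ≤ i then
        (st.1 ++ [PySem.List.pyGetD myList i 0], st.2.1, st.2.2)
      else
        if 6 ≤ st.2.1.length then
          (st.1, [PySem.List.pyGetD myList i 0], st.2.2 ++ [st.2.1])
        else
          (st.1, st.2.1 ++ [PySem.List.pyGetD myList i 0], st.2.2))
    ([], [], [])).1

-- ===== PORT B =====
def shiftCost_alt (myList : List Int) (departments : Int) : List Int :=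
  PySem.List.slice myList (some (max 3 ((myList.length : Int) - departments))) none

-- ===== PRECONDITION & SPEC =====
def Spec_shiftCost (myList : List Int) (departments : Int) (out : List Int) : Prop := out = shiftCost_alt myList departments
instance (myList : List Int) (departments : Int) (out : List Int) : Decidable (Spec_shiftCost myList departments out) := by unfold Spec_shiftCost; infer_instance

-- ===== CLAIM (what is proved, stated in full; the proofs are below) =====
def Claim_equal_shiftCost : Prop := ∀ (myList : List Int) (departments : Int), Dom_shiftCost myList departments → Spec_shiftCost myList departments (shiftCost myList departments)

-- ===== LEMMAS AND PROOFS =====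

-- the first component of A's fold ignores the flowCost bookkeeping: it is the filtered-append loop
theorem fst_fold_shiftCost (myList : List Int) (t : Int) :
    ∀ (l : List Int) (sc fc : List Int) (fc2 : List (List Int)),
    (l.foldl
      (fun (st : List Int × List Int × List (List Int)) i =>
        if t ≤ i then
          (st.1 ++ [PySem.List.pyGetD myList i 0], st.2.1, st.2.2)
        else
          if 6 ≤ st.2.1.length then
            (st.1, [PySem.List.pyGetD myList i 0], st.2.2 ++ [st.2.1])
          else
            (st.1, st.2.1 ++ [PySem.List.pyGetD myList i 0], st.2.2))
      (sc, fc, fc2)).1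
    = sc ++ (l.filter (fun i => decide (t ≤ i))).map (fun i => PySem.List.pyGetD myList i 0) := by
  intro l
  induction l with
  | nil => intro sc fc fc2; simp
  | cons i l ih =>
    intro sc fc fc2
    by_cases h : t ≤ i
    · simp [List.foldl_cons, h, ih]
    · by_cases h6 : 6 ≤ fc.length <;> simp [List.foldl_cons, h, h6, ih]

-- filtering range(a, n) by (t ≤ ·) leaves range(min n (max a t), n)
theorem filter_pyRange_ge (a n t : Int) :
    (PySem.List.pyRange a n 1).filter (fun i => decide (t ≤ i))
      = PySem.List.pyRange (min n (max a t)) n 1 := by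
  by_cases han : a ≤ n
  · rw [PySem.List.pyRange_one_append a (min n (max a t)) n (by omega) (by omega)]
    rw [List.filter_append]
    have h1 : (PySem.List.pyRange a (min n (max a t)) 1).filter (fun i => decide (t ≤ i)) = [] := by
      rw [List.filter_eq_nil_iff]
      intro x hx
      have := (PySem.List.mem_pyRange_one).1 hx
      simp only [decide_eq_true_eq]
      omega
    have h2 : (PySem.List.pyRange (min n (max a t)) n 1).filter (fun i => decide (t ≤ i))
        = PySem.List.pyRange (min n (max a t)) n 1 := by
      rw [List.filter_eq_self]
      intro x hx
      have := (PySem.List.mem_pyRange_one).1 hx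
      simp only [decide_eq_true_eq]
      omega
    rw [h1, h2, List.nil_append]
  · rw [PySem.List.pyRange_one_eq_nil (by omega), PySem.List.pyRange_one_eq_nil (by omega)]
    rfl

-- mapping elementwise lookup over range(m, len) yields drop m
theorem map_pyGetD_pyRange_drop (xs : List Int) (m : Int) (hm : 0 ≤ m) :
    (PySem.List.pyRange m (xs.length : Int) 1).map (fun i => PySem.List.pyGetD xs i 0)
      = xs.drop m.toNat := by
  have h := PySem.List.foldl_pyRange_pyGetD' (xs := xs) (a := m) (d := (0 : Int))
    (f := fun (acc : List Int) (v : Int) => acc ++ [v]) (init := ([] : List Int)) hm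
  have hmap : ∀ (l : List Int) (acc : List Int),
      l.foldl (fun acc v => acc ++ [v]) acc = acc ++ l := by
    intro l
    induction l with
    | nil => intro acc; simp
    | cons x l ih => intro acc; simp [List.foldl_cons, ih]
  calc (PySem.List.pyRange m (xs.length : Int) 1).map (fun i => PySem.List.pyGetD xs i 0)
      = (PySem.List.pyRange m (xs.length : Int) 1).foldl
          (fun acc i => acc ++ [PySem.List.pyGetD xs i 0]) [] := by
        rw [PySem.List.foldl_append_singleton_eq_map, List.nil_append]
    _ = (xs.drop m.toNat).foldl (fun acc v => acc ++ [v]) [] := h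
    _ = xs.drop m.toNat := by rw [hmap]; simp

-- ===== VERDICT (by name: the statement is the Claim_ definition above) =====
theorem shiftCost_spec : Claim_equal_shiftCost := by
  intro myList departments _
  unfold Spec_shiftCost shiftCost shiftCost_alt
  set n : Int := (myList.length : Int) with hn
  set t : Int := n - departments with ht
  rw [fst_fold_shiftCost myList t, List.nil_append, filter_pyRange_ge 3 n t,
    map_pyGetD_pyRange_drop myList (min n (max 3 t)) (by omega),
    PySem.List.slice_from myList (by omega : (0:Int) ≤ max 3 t)]
  by_cases h : max 3 t ≤ n
  · have : min n (max 3 t) = max 3 t := by omega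
    rw [this]
  · rw [List.drop_eq_nil_of_le (by omega), List.drop_eq_nil_of_le (by omega)]
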